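-- pv_equiv track=rewrite | github.com/ericklaus16/alocacao_tarefas | extra_functions.py | temRecursoDisponivelBalanceado
-- ===== SOURCE A (Python) =====
-- def temRecursoDisponivelBalanceado(escalonamento, inicio, fim):
--     recursos_disponiveis = {}
--
--     for idx, recurso in enumerate(escalonamento):
--         conflito = False
--
--         for ocupado_inicio, ocupado_fim in recurso:
--             if not (fim <= ocupado_inicio or inicio >= ocupado_fim):
--                 conflito = True
--                 break
--
--         if not conflito:
--             # Calcula tempo total ocupado neste recurso
--             tempo_total = sum(fim - inicio for inicio, fim in recurso)
--             recursos_disponiveis[idx] = tempo_total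
--
--     # Escolhe o recurso com MENOR tempo ocupado (mais balanceado)
--     if recursos_disponiveis:
--         melhor_recurso = min(recursos_disponiveis, # Verificar com o Andrezão se é correto usar o min aqui
--                              key=recursos_disponiveis.get)
--         return melhor_recurso
--     else:
--         return False
-- ===== SOURCE B (Python) =====
-- def temRecursoDisponivelBalanceado(escalonamento, inicio, fim):
--     candidatos = sorted(
--         (sum(f - i for i, f in recurso), idx)
--         for idx, recurso in enumerate(escalonamento)
--         if all(fim <= ocupado_inicio or inicio >= ocupado_fim
--                for ocupado_inicio, ocupado_fim in recurso)
--     )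
--     if not candidatos:
--         return False
--     return candidatos[0][1]
-- ===== Notes on version B (the rewrite author's own statement) =====
-- stated objective: alternative
-- what changed: B replaces A's dict-building loop plus min(dict, key=get) selection by building a list of (tempo, idx) tuples for the non-conflicting resources (conflict test in positive all-disjoint form) and sorting it, returning the second component of the smallest tuple; lexicographic tuple order with distinct indices reproduces min's first-minimum tie-breaking. Pre_ excludes inputs with no conflict-free resource, where A returns the bool False rather than an int.
-- outside the precondition, e.g. on temRecursoDisponivelBalanceado([], 0, 0): A returns False, B returns False; on temRecursoDisponivelBalanceado([[(0, 2)]], 1, 3): A returns False, B returns False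
import Mathlib
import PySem

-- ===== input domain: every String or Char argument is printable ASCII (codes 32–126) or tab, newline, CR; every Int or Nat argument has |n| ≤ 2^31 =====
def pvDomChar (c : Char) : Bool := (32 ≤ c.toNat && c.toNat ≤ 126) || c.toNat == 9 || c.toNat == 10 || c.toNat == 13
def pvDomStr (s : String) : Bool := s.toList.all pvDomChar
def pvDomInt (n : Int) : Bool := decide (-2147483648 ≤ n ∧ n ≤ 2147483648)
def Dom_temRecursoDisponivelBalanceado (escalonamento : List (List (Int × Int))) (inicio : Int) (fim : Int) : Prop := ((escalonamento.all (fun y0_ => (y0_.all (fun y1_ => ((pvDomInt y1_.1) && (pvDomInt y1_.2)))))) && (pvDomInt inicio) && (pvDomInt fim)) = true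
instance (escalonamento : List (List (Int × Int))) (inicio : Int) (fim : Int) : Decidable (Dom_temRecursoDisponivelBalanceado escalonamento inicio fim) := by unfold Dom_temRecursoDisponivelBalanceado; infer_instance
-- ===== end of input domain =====

-- B replaces A's dict-plus-min(key=get) selection by sorting a list of (tempo, idx) tuples for the
-- non-conflicting resources and taking the first; lexicographic tuple order with distinct idx
-- reproduces min's first-minimum tie rule (objective: alternative; same asymptotic cost).

-- ===== PORT A =====
-- inner loop with break on first conflicting interval
def pvConflito (recurso : List (Int × Int)) (inicio fim : Int) : Bool :=
  recurso.any (fun p => !(decide (fim ≤ p.1) || decide (inicio ≥ p.2)))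

-- tempo_total = sum(fim - inicio for inicio, fim in recurso)
def pvTempo (recurso : List (Int × Int)) : Int :=
  (recurso.map (fun p => p.2 - p.1)).sum

-- min(recursos_disponiveis, key=recursos_disponiveis.get): keys in insertion order,
-- first key with the minimal value; exact because each items pair (k, v) has d.get k = v
-- (keys from enumerate are distinct), so min over keys by get is the first-min over items.
def pvMinItems : List (Int × Int) → Option Int
  | [] => none
  | x :: rest => some ((rest.foldl (fun b p => if p.2 < b.2 then p else b) x).1)

def temRecursoDisponivelBalanceado (escalonamento : List (List (Int × Int))) (inicio : Int) (fim : Int) : Option Int :=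
  pvMinItems
    ((PySem.List.enumerate escalonamento).foldl
      (fun d p => if pvConflito p.2 inicio fim then d else d.insert p.1 (pvTempo p.2))
      (PySem.Dict.empty : PySem.Dict Int Int)).items

-- ===== PORT B =====
-- candidatos = sorted((tempo, idx) generator with an 'if all(disjoint)' filter); return candidatos[0][1]
def temRecursoDisponivelBalanceado_alt (escalonamento : List (List (Int × Int))) (inicio : Int) (fim : Int) : Option Int :=
  let candidatos :=
    PySem.List.sorted2
      (((PySem.List.enumerate escalonamento).filter
          (fun p => p.2.all (fun q => decide (fim ≤ q.1) || decide (inicio ≥ q.2)))).map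
        (fun p => ((p.2.map (fun q => q.2 - q.1)).sum, p.1)))
      Prod.fst Prod.snd
  match candidatos with
  | [] => none
  | c :: _ => some c.2

-- ===== PRECONDITION & SPEC =====
-- Pre_ excludes exactly the inputs with no conflict-free resource: there A returns the bool False,
-- which is not a value of the declared Optional[int] return type (the ports return none there).
def Pre_temRecursoDisponivelBalanceado (escalonamento : List (List (Int × Int))) (inicio : Int) (fim : Int) : Prop :=
  ∃ recurso ∈ escalonamento, ∀ q ∈ recurso, fim ≤ q.1 ∨ inicio ≥ q.2
instance (escalonamento : List (List (Int × Int))) (inicio : Int) (fim : Int) : Decidable (Pre_temRecursoDisponivelBalanceado escalonamento inicio fim) := by unfold Pre_temRecursoDisponivelBalanceado; infer_instance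
def pvWitness_temRecursoDisponivelBalanceado : (List (List (Int × Int))) × Int × Int := ([[(2, 3)], []], 0, 1)

def Spec_temRecursoDisponivelBalanceado (escalonamento : List (List (Int × Int))) (inicio : Int) (fim : Int) (out : Option Int) : Prop := out = temRecursoDisponivelBalanceado_alt escalonamento inicio fim
instance (escalonamento : List (List (Int × Int))) (inicio : Int) (fim : Int) (out : Option Int) : Decidable (Spec_temRecursoDisponivelBalanceado escalonamento inicio fim out) := by unfold Spec_temRecursoDisponivelBalanceado; infer_instance

-- ===== CLAIM (what is proved, stated in full; the proofs are below) =====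
def Claim_equal_temRecursoDisponivelBalanceado : Prop := ∀ (escalonamento : List (List (Int × Int))) (inicio : Int) (fim : Int), Dom_temRecursoDisponivelBalanceado escalonamento inicio fim → Pre_temRecursoDisponivelBalanceado escalonamento inicio fim → Spec_temRecursoDisponivelBalanceado escalonamento inicio fim (temRecursoDisponivelBalanceado escalonamento inicio fim)

-- ===== LEMMAS AND PROOFS =====

-- the comparison sorted2 uses on (tempo, idx) tuples (Python's lexicographic '<')
def pvBef (a b : Int × Int) : Bool :=
  decide (a.1 < b.1) || (!decide (b.1 < a.1) && decide (a.2 < b.2))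

-- first-minimum fold under pvBef (strict: a later element displaces the incumbent only if strictly before)
def pvLexMin (acc : Option (Int × Int)) (l : List (Int × Int)) : Option (Int × Int) :=
  l.foldl (fun m x => match m with
    | none => some x
    | some m => if pvBef x m then some x else some m) acc

-- A's dict fold over pairwise-distinct fresh keys collects exactly the filtered items, appended.
theorem pv_items_fold (inicio fim : Int) :
    ∀ (l : List (Int × List (Int × Int))) (d : PySem.Dict Int Int),
      (∀ p ∈ l, d.contains p.1 = false) → (l.map Prod.fst).Nodup →
      (l.foldl (fun d p => if pvConflito p.2 inicio fim then d else d.insert p.1 (pvTempo p.2)) d).items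
        = d.items ++ (l.filter (fun p => !pvConflito p.2 inicio fim)).map (fun p => (p.1, pvTempo p.2)) := by
  intro l
  induction l with
  | nil => intro d _ _; simp
  | cons x xs ih =>
    intro d hfresh hnodup
    simp only [List.map_cons, List.nodup_cons] at hnodup
    by_cases hc : pvConflito x.2 inicio fim = true
    · rw [List.foldl_cons, if_pos hc,
          ih d (fun p hp => hfresh p (List.mem_cons_of_mem _ hp)) hnodup.2]
      simp [hc]
    · rw [List.foldl_cons, if_neg hc]
      have hfresh' : ∀ p ∈ xs, (d.insert x.1 (pvTempo x.2)).contains p.1 = false := by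
        intro p hp
        rw [PySem.Dict.contains_insert]
        have hne : p.1 ≠ x.1 := by
          intro h
          exact hnodup.1 (h ▸ List.mem_map_of_mem hp)
        simp [hne, hfresh p (List.mem_cons_of_mem _ hp)]
      rw [ih _ hfresh' hnodup.2,
          PySem.Dict.items_insert_of_not_contains _ _ (hfresh x (List.mem_cons_self ..))]
      simp [hc]

-- head of an insertBy step: only the old head matters
theorem pv_head_insertBy (before : Int × Int → Int × Int → Bool) (x : Int × Int) (ys : List (Int × Int)) :
    (PySem.List.insertBy before x ys).head? =
      some (match ys.head? with
            | none => x
            | some y => if before x y then x else y) := by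
  cases ys with
  | nil => rfl
  | cons y t =>
    by_cases h : before x y = true <;> simp [PySem.List.insertBy, h]

-- head of the insertion-sort fold = first-minimum incumbent fold under pvBef
theorem pv_head_sort_fold :
    ∀ (l : List (Int × Int)) (acc : List (Int × Int)),
      (l.foldl (fun acc x => PySem.List.insertBy pvBef x acc) acc).head? = pvLexMin acc.head? l := by
  intro l
  induction l with
  | nil => intro acc; rfl
  | cons x xs ih =>
    intro acc
    rw [List.foldl_cons, ih, pv_head_insertBy]
    cases acc with
    | nil => rfl
    | cons y t =>
      simp only [List.head?_cons]
      by_cases h : pvBef x y <;> simp [pvLexMin, h]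

-- on a list whose second components strictly increase past the incumbent's, pvBef degenerates to a
-- strict first-component comparison, so pvLexMin is exactly A's first-min fold (on swapped pairs)
theorem pv_lexmin_fst :
    ∀ (l : List (Int × Int)) (m : Int × Int),
      l.Pairwise (fun a b => a.2 < b.2) → (∀ x ∈ l, m.2 < x.2) →
      pvLexMin (some m) l = some (l.foldl (fun b p => if p.1 < b.1 then p else b) m) := by
  intro l
  induction l with
  | nil => intro m _ _; rfl
  | cons x xs ih =>
    intro m hpw hm
    have hx : m.2 < x.2 := hm x (List.mem_cons_self ..)
    have hpw' := (List.pairwise_cons.mp hpw)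
    have hb : pvBef x m = decide (x.1 < m.1) := by
      unfold pvBef
      have : ¬ (x.2 < m.2) := by omega
      simp [this]
    have step : pvLexMin (some m) (x :: xs) = pvLexMin (some (if x.1 < m.1 then x else m)) xs := by
      unfold pvLexMin
      rw [List.foldl_cons]
      by_cases h : x.1 < m.1 <;> simp [hb, h]
    rw [step]
    have hnext : ∀ y ∈ xs, (if x.1 < m.1 then x else m).2 < y.2 := by
      intro y hy
      by_cases h : x.1 < m.1 <;> simp [h]
      · exact hpw'.1 y hy
      · exact hm y (List.mem_cons_of_mem _ hy)
    rw [ih _ hpw'.2 hnext, List.foldl_cons]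

-- fold over swapped pairs = swap of the fold over the original pairs
theorem pv_fold_swap :
    ∀ (l : List (Int × Int)) (b : Int × Int),
      (l.map Prod.swap).foldl (fun b p => if p.1 < b.1 then p else b) (Prod.swap b)
        = Prod.swap (l.foldl (fun b p => if p.2 < b.2 then p else b) b) := by
  intro l
  induction l with
  | nil => intro b; rfl
  | cons x xs ih =>
    intro b
    simp only [List.map_cons, List.foldl_cons]
    by_cases h : x.2 < b.2
    · simpa [Prod.swap, h] using ih x
    · simpa [Prod.swap, h] using ih b

-- B's generator filter is A's non-conflict test in positive form
theorem pv_filter_eq (inicio fim : Int) (p : Int × List (Int × Int)) :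
    (p.2.all (fun q => decide (fim ≤ q.1) || decide (inicio ≥ q.2))) = !pvConflito p.2 inicio fim := by
  unfold pvConflito
  simp [List.all_eq_not_any_not]

-- ===== VERDICT (by name: the statement is the Claim_ definition above) =====
theorem temRecursoDisponivelBalanceado_spec : Claim_equal_temRecursoDisponivelBalanceado := by
  intro escalonamento inicio fim _ _
  show temRecursoDisponivelBalanceado escalonamento inicio fim
      = temRecursoDisponivelBalanceado_alt escalonamento inicio fim
  unfold temRecursoDisponivelBalanceado temRecursoDisponivelBalanceado_alt
  -- name A's items list
  have hnodup : ((PySem.List.enumerate escalonamento).map Prod.fst).Nodup := by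
    rw [List.Nodup, List.pairwise_map]
    exact (PySem.List.pairwise_lt_enumerate escalonamento 0).imp (fun h => ne_of_lt h)
  have hfresh : ∀ p ∈ PySem.List.enumerate escalonamento,
      (PySem.Dict.empty : PySem.Dict Int Int).contains p.1 = false := by
    intro p _; simp [PySem.Dict.contains_empty]
  rw [pv_items_fold inicio fim _ _ hfresh hnodup]
  set filt := (PySem.List.enumerate escalonamento).filter
      (fun p => !pvConflito p.2 inicio fim) with hfilt
  have hfilt2 : (PySem.List.enumerate escalonamento).filter
      (fun p => p.2.all (fun q => decide (fim ≤ q.1) || decide (inicio ≥ q.2))) = filt := by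
    rw [hfilt]
    exact List.filter_congr (fun p _ => pv_filter_eq inicio fim p)
  rw [hfilt2]
  -- B's candidate list is the Prod.swap image of A's items list
  have hcand : (filt.map (fun p => ((p.2.map (fun q => q.2 - q.1)).sum, p.1)))
      = (filt.map (fun p => (p.1, pvTempo p.2))).map Prod.swap := by
    simp [pvTempo, Function.comp, Prod.swap]
  rw [hcand]
  -- idx components of A's items strictly increase
  have hpw : (filt.map (fun p => (p.1, pvTempo p.2))).Pairwise (fun a b => a.1 < b.1) := by
    rw [List.pairwise_map]
    exact ((PySem.List.pairwise_lt_enumerate escalonamento 0).filter _)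
  -- sorted2 with rev = false is the insertBy fold with pvBef
  have hs2 : ∀ (l : List (Int × Int)),
      PySem.List.sorted2 l Prod.fst Prod.snd = l.foldl (fun acc x => PySem.List.insertBy pvBef x acc) [] := by
    intro l; rfl
  cases hitems : filt.map (fun p => (p.1, pvTempo p.2)) with
  | nil => simp [hs2, pvMinItems, PySem.Dict.empty]
  | cons x rest =>
    simp only [PySem.Dict.empty, List.nil_append, pvMinItems]
    have hpw' : (x :: rest).Pairwise (fun a b : Int × Int => a.1 < b.1) := hitems ▸ hpw
    have hpwswap : (rest.map Prod.swap).Pairwise (fun a b : Int × Int => a.2 < b.2) := by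
      rw [List.pairwise_map]
      exact (List.pairwise_cons.mp hpw').2.imp (fun h => h)
    have hmswap : ∀ y ∈ rest.map Prod.swap, (Prod.swap x).2 < y.2 := by
      intro y hy
      obtain ⟨z, hz, rfl⟩ := List.mem_map.mp hy
      exact (List.pairwise_cons.mp hpw').1 z hz
    -- evaluate B's head via the fold lemmas
    have hhead : (PySem.List.sorted2 ((x :: rest).map Prod.swap) Prod.fst Prod.snd).head?
        = some (Prod.swap ((rest.foldl (fun b p => if p.2 < b.2 then p else b) x))) := by
      rw [hs2, pv_head_sort_fold]
      simp only [List.map_cons, List.head?_nil]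
      have : pvLexMin (none : Option (Int × Int)) (Prod.swap x :: rest.map Prod.swap)
          = pvLexMin (some (Prod.swap x)) (rest.map Prod.swap) := rfl
      rw [this, pv_lexmin_fst _ _ hpwswap hmswap, pv_fold_swap]
    cases hsort : PySem.List.sorted2 ((x :: rest).map Prod.swap) Prod.fst Prod.snd with
    | nil => rw [hsort] at hhead; simp at hhead
    | cons c t =>
      rw [hsort] at hhead
      simp only [List.head?_cons, Option.some.injEq] at hhead
      simp [hhead, Prod.swap]
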